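-- pv_equiv track=rewrite | github.com/felixkru/Big-Data | src/file_reader_h5.py | return_file_attributes
-- ===== SOURCE A (Python) =====
-- def return_file_attributes(file):
--
--     region_attribute = ""
--     instrument_attribute = ""
--
--     for item in file:
--         if item[0] == 'configuration':
--             region_attribute = item[1]
--         elif item[0] == 'instrument':
--             instrument_attribute = item[1]
--
--     return region_attribute, instrument_attribute
-- ===== SOURCE B (Python) =====
-- def return_file_attributes(file):
--     def last_value(key):
--         # scan back-to-front; the first match from the end is the last occurrence
--         for k, v in reversed(file):
--             if k == key:
--                 return v
--         return ""
--     return last_value('configuration'), last_value('instrument')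
-- ===== Notes on version B (the rewrite author's own statement) =====
-- stated objective: alternative
-- what changed: Replaces A's single forward pass updating two accumulators with two staged back-to-front searches that early-return the first match from the end (i.e. the last occurrence) for each key.
import Mathlib
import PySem

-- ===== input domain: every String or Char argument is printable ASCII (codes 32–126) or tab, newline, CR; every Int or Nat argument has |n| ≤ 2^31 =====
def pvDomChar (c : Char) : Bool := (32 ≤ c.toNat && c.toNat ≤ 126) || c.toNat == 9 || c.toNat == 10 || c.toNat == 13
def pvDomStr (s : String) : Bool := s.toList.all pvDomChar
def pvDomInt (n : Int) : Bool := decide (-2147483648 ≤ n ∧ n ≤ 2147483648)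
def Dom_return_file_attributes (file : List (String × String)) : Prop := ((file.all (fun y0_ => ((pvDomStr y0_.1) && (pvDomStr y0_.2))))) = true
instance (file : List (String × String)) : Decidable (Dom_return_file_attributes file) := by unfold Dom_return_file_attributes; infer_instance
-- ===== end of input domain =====

-- B replaces A's forward pass with two accumulators by two staged back-to-front
-- first-match searches (objective: alternative, same cost).

-- ===== PORT A =====
def return_file_attributes (file : List (String × String)) : String × String :=
  file.foldl
    (fun acc item =>
      if item.1 == "configuration" then (item.2, acc.2)
      else if item.1 == "instrument" then (acc.1, item.2)
      else acc)
    ("", "")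

-- ===== PORT B =====
-- first match scanning a (reversed) list; "" if no match — B's inner loop with early return
def rfa_lastValue (key : String) : List (String × String) → String
  | [] => ""
  | item :: rest => if item.1 == key then item.2 else rfa_lastValue key rest

def return_file_attributes_alt (file : List (String × String)) : String × String :=
  (rfa_lastValue "configuration" file.reverse, rfa_lastValue "instrument" file.reverse)

-- ===== PRECONDITION & SPEC =====
def Spec_return_file_attributes (file : List (String × String)) (out : String × String) : Prop := out = return_file_attributes_alt file
instance (file : List (String × String)) (out : String × String) : Decidable (Spec_return_file_attributes file out) := by unfold Spec_return_file_attributes; infer_instance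

-- ===== CLAIM (what is proved, stated in full; the proofs are below) =====
def Claim_equal_return_file_attributes : Prop := ∀ (file : List (String × String)), Dom_return_file_attributes file → Spec_return_file_attributes file (return_file_attributes file)

-- ===== LEMMAS AND PROOFS =====
lemma rfa_eq (file : List (String × String)) :
    return_file_attributes file = return_file_attributes_alt file := by
  induction file using List.reverseRecOn with
  | nil => rfl
  | append_singleton tl x ih =>
    obtain ⟨k, v⟩ := x
    unfold return_file_attributes return_file_attributes_alt at *
    simp only [List.foldl_append, List.foldl_cons, List.foldl_nil,
      List.reverse_append, List.reverse_cons, List.reverse_nil,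
      List.nil_append, List.cons_append, rfa_lastValue] at *
    by_cases hc : (k == "configuration") = true
    · have hk : k = "configuration" := by simpa using hc
      subst hk
      simp only [Prod.ext_iff] at ih
      simpa [Prod.ext_iff] using ih.2
    · by_cases hi : (k == "instrument") = true
      · have hk : k = "instrument" := by simpa using hi
        subst hk
        simp only [Prod.ext_iff] at ih
        simpa [Prod.ext_iff] using ih.1
      · have h1 : (k == "configuration") = false := by simpa using hc
        have h2 : (k == "instrument") = false := by simpa using hi
        simpa [h1, h2] using ih

-- ===== VERDICT (by name: the statement is the Claim_ definition above) =====
theorem return_file_attributes_spec : Claim_equal_return_file_attributes := by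
  intro file _
  exact rfa_eq file
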